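-- pv_equiv track=rewrite | github.com/metalwhale/crystal | crystal-ai/crystal/_common/train.py | find_redundancy_length
-- ===== SOURCE A (Python) =====
-- from collections import defaultdict
--
-- def find_redundancy_length(text: str, ignored_chars: list[str] = []) -> int:
--     # Strides for each character
--     char_strides: dict[str, tuple[int, dict[int, int]]] = {}
--     for position, char in enumerate(text):
--         if char in ignored_chars:
--             continue
--         if char not in char_strides:
--             char_strides[char] = (position, defaultdict(int))
--         else:
--             last_position, strides = char_strides[char]
--             distance = position - last_position
--             # A "stride" is an occurrence of the same character at different positions that are spaced by an equal distance
--             strides[distance] += 1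
--             char_strides[char] = (position, strides)
--     # Overall strides for all characters
--     overall_strides: dict[int, int] = defaultdict(int)
--     for char, (_, strides) in char_strides.items():
--         for distance, occurrence in strides.items():
--             overall_strides[distance] += occurrence
--     # Get the longest length of the stride redundancies
--     redundancy_length = max(overall_strides.values(), default=0)
--     return redundancy_length
-- ===== SOURCE B (Python) =====
-- def find_redundancy_length(text: str, ignored_chars: list[str] = []) -> int:
--     # Staged per-character passes: for each distinct character (first-occurrence
--     # order), scan the text collecting the gaps between its consecutive
--     # occurrences into one flat list; the answer is the highest multiplicity
--     # in that list of gaps.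
--     gaps: list[int] = []
--     for ch in dict.fromkeys(text):
--         if ch in ignored_chars:
--             continue
--         prev = -1
--         for pos, c in enumerate(text):
--             if c == ch:
--                 if prev >= 0:
--                     gaps.append(pos - prev)
--                 prev = pos
--     return max(map(gaps.count, gaps), default=0)
-- ===== Notes on version B (the rewrite author's own statement) =====
-- stated objective: alternative
-- what changed: Replaces the single pass building nested per-character stride dictionaries plus a merge pass and max-of-dict-values by staged per-character scans (one scan of the text per distinct character) that emit all consecutive-occurrence gaps into one flat list, whose highest multiplicity (max over gaps.count) is the answer; no dictionaries at all.
import Mathlib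
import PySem

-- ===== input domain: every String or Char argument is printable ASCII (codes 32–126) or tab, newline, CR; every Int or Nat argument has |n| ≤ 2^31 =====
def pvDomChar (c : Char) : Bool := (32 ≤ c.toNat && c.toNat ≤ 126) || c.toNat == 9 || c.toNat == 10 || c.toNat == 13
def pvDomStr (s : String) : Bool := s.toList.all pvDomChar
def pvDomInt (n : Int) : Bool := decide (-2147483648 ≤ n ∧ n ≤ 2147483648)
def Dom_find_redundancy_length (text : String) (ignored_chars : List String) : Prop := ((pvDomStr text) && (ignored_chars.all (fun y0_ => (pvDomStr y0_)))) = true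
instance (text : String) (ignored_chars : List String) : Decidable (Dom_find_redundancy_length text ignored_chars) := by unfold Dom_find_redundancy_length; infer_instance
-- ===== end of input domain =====

-- B replaces A's nested per-character stride dictionaries + merge pass + max of dict values
-- by staged per-character scans that emit every consecutive-occurrence gap into one flat list
-- and return that list's highest multiplicity (objective: alternative; no dictionaries, at the
-- price of one scan of the text per distinct character).

-- ===== PORT A =====
-- loop body of A's enumerate loop over (position, char)
def pvStepA (ignored_chars : List String) (d : PySem.Dict Char (Int × PySem.Dict Int Int))
    (pc : Int × Char) : PySem.Dict Char (Int × PySem.Dict Int Int) :=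
  if ignored_chars.contains (String.mk [pc.2]) then d
  else
    match d.get? pc.2 with
    | none => d.insert pc.2 (pc.1, PySem.Dict.empty)
    | some (last_position, strides) =>
        d.insert pc.2 (pc.1, strides.modify (pc.1 - last_position) 0 (· + 1))

-- A's second pass: merge the per-char stride dicts into overall_strides
def pvMergeA (char_strides : PySem.Dict Char (Int × PySem.Dict Int Int)) : PySem.Dict Int Int :=
  char_strides.items.foldl
    (fun o kv => kv.2.2.items.foldl (fun o dv => o.modify dv.1 0 (· + dv.2)) o)
    PySem.Dict.empty

def find_redundancy_length (text : String) (ignored_chars : List String) : Int :=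
  let char_strides :=
    (PySem.List.enumerate text.toList 0).foldl (pvStepA ignored_chars) PySem.Dict.empty
  let overall_strides := pvMergeA char_strides
  (PySem.List.max? overall_strides.values (fun x => x)).getD 0

-- ===== PORT B =====
-- body of B's inner scan for one character ch: state = (gaps so far, prev)
def pvScanB (ch : Char) (st : List Int × Int) (pc : Int × Char) : List Int × Int :=
  if pc.2 == ch then
    ((if 0 ≤ st.2 then st.1 ++ [pc.1 - st.2] else st.1), pc.1)
  else st

-- dict.fromkeys(text) = first-occurrence distinct chars = PySem.List.dedup (exact per PYSEM.md)
def find_redundancy_length_alt (text : String) (ignored_chars : List String) : Int :=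
  let gaps := (PySem.List.dedup text.toList).foldl
    (fun g ch => if ignored_chars.contains (String.mk [ch]) then g
      else ((PySem.List.enumerate text.toList 0).foldl (pvScanB ch) (g, -1)).1) []
  (PySem.List.max? (gaps.map (fun d => (PySem.List.count gaps d : Int))) (fun x => x)).getD 0

-- ===== PRECONDITION & SPEC =====
def Spec_find_redundancy_length (text : String) (ignored_chars : List String) (out : Int) : Prop := out = find_redundancy_length_alt text ignored_chars
instance (text : String) (ignored_chars : List String) (out : Int) : Decidable (Spec_find_redundancy_length text ignored_chars out) := by unfold Spec_find_redundancy_length; infer_instance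

-- ===== CLAIM (what is proved, stated in full; the proofs are below) =====
def Claim_equal_find_redundancy_length : Prop := ∀ (text : String) (ignored_chars : List String), Dom_find_redundancy_length text ignored_chars → Spec_find_redundancy_length text ignored_chars (find_redundancy_length text ignored_chars)

-- ===== LEMMAS AND PROOFS =====

-- positions of char c in an enumerate list
def pvOcc (c : Char) (l : List (Int × Char)) : List Int :=
  (l.filter (fun pc => pc.2 == c)).map Prod.fst

-- gaps between consecutive entries
def pvGaps : List Int → List Int
  | a :: b :: t => (b - a) :: pvGaps (b :: t)
  | _ => []

-- gaps with an explicit "previous" sentinel (active iff 0 ≤ p), mirroring B's inner scan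
def pvGapsFrom (p : Int) : List Int → List Int
  | [] => []
  | q :: t => (if 0 ≤ p then [q - p] else []) ++ pvGapsFrom q t

-- ignored-char test as a function
def pvIgn (ign : List String) (c : Char) : Bool := ign.contains (String.mk [c])

theorem pvOcc_append (c : Char) (l : List (Int × Char)) (x : Int × Char) :
    pvOcc c (l ++ [x]) = pvOcc c l ++ (if x.2 == c then [x.1] else []) := by
  simp only [pvOcc, List.filter_append]
  split <;> simp_all

theorem pvGaps_append : ∀ (xs : List Int) (p : Int), xs ≠ [] →
    pvGaps (xs ++ [p]) = pvGaps xs ++ [p - xs.getLast?.getD 0]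
  | [], _, h => absurd rfl h
  | [a], p, _ => by simp [pvGaps]
  | a :: b :: t, p, _ => by
    have ih := pvGaps_append (b :: t) p (by simp)
    simp only [List.cons_append] at ih ⊢
    simp [pvGaps, ih]

theorem pv_getLast_cons (a p : Int) (l : List Int) :
    ((a :: l).getLast?).getD p = l.getLast?.getD a := by
  cases l with
  | nil => rfl
  | cons b t =>
    rw [List.getLast?_cons_cons]
    cases h : (b :: t).getLast? with
    | none => exact absurd (List.getLast?_eq_none_iff.mp h) (by simp)
    | some y => rfl

-- B's inner scan, characterized
theorem pvScanB_fold (ch : Char) : ∀ (l : List (Int × Char)) (g : List Int) (p : Int),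
    l.foldl (pvScanB ch) (g, p) =
      (g ++ pvGapsFrom p (pvOcc ch l), (pvOcc ch l).getLast?.getD p)
  | [], g, p => by simp [pvOcc, pvGapsFrom]
  | x :: t, g, p => by
    obtain ⟨xp, xc⟩ := x
    by_cases hx : xc = ch
    · subst hx
      have ih := pvScanB_fold xc t (if 0 ≤ p then g ++ [xp - p] else g) xp
      have hocc : pvOcc xc ((xp, xc) :: t) = xp :: pvOcc xc t := by
        simp [pvOcc, List.filter_cons]
      have hstep : pvScanB xc (g, p) (xp, xc) = ((if 0 ≤ p then g ++ [xp - p] else g), xp) := by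
        simp [pvScanB]
      rw [List.foldl_cons, hstep, ih, hocc]
      refine Prod.ext ?_ ?_
      · show (if 0 ≤ p then g ++ [xp - p] else g) ++ pvGapsFrom xp (pvOcc xc t)
          = g ++ pvGapsFrom p (xp :: pvOcc xc t)
        simp only [pvGapsFrom]
        split <;> simp
      · show (pvOcc xc t).getLast?.getD xp = ((xp :: pvOcc xc t).getLast?).getD p
        exact (pv_getLast_cons xp p (pvOcc xc t)).symm
    · have ih := pvScanB_fold ch t g p
      have hocc : pvOcc ch ((xp, xc) :: t) = pvOcc ch t := by
        simp [pvOcc, List.filter_cons, hx]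
      have hstep : pvScanB ch (g, p) (xp, xc) = (g, p) := by
        simp [pvScanB, hx]
      rw [List.foldl_cons, hstep, ih, hocc]

theorem pvGapsFrom_pos : ∀ (p : Int) (xs : List Int), 0 ≤ p → (∀ x ∈ xs, 0 ≤ x) →
    pvGapsFrom p xs = pvGaps (p :: xs)
  | p, [], _, _ => by simp [pvGapsFrom, pvGaps]
  | p, q :: t, hp, hall => by
    have ih := pvGapsFrom_pos q t (hall q (by simp)) (fun x hx => hall x (by simp [hx]))
    simp [pvGapsFrom, pvGaps, ih, hp]

theorem pvGapsFrom_neg (xs : List Int) (h : ∀ x ∈ xs, 0 ≤ x) :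
    pvGapsFrom (-1) xs = pvGaps xs := by
  cases xs with
  | nil => rfl
  | cons q t =>
    simp only [pvGapsFrom, show ¬ (0:Int) ≤ -1 by norm_num, if_false, List.nil_append]
    exact pvGapsFrom_pos q t (h q (by simp)) (fun x hx => h x (by simp [hx]))

-- dedup of an appended element
theorem pv_dedup_append (ys : List Char) (y : Char) :
    PySem.List.dedup (ys ++ [y]) =
      if y ∈ PySem.List.dedup ys then PySem.List.dedup ys else PySem.List.dedup ys ++ [y] := by
  simp only [PySem.List.dedup_eq_ofList, PySem.Set.ofList_eq_foldl, List.foldl_append,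
    List.foldl_cons, List.foldl_nil]
  by_cases hy : y ∈ ys.foldl PySem.Set.add []
  · simp [PySem.Set.add, PySem.Set.contains, hy]
  · simp [PySem.Set.add, PySem.Set.contains, hy]

-- invariant of A's first pass over the processed prefix l
def pvInvA (ign : List String) (l : List (Int × Char))
    (A : PySem.Dict Char (Int × PySem.Dict Int Int)) : Prop :=
  A.keys = PySem.List.dedup ((l.filter (fun pc => !pvIgn ign pc.2)).map Prod.snd) ∧
  A.keys.Nodup ∧
  ∀ c, pvIgn ign c = false →
    (A.get? c = none ∧ pvOcc c l = []) ∨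
    (∃ s, A.get? c = some ((pvOcc c l).getLast?.getD 0, s) ∧ pvOcc c l ≠ [] ∧
      (∀ k, s.getD k 0 = ((pvGaps (pvOcc c l)).count k : Int)) ∧
      (∀ k, s.contains k = (pvGaps (pvOcc c l)).contains k) ∧ s.keys.Nodup)

theorem pvInvA_nil (ign : List String) : pvInvA ign [] PySem.Dict.empty :=
  ⟨rfl, PySem.Dict.nodup_keys_empty, fun _ _ => Or.inl ⟨rfl, rfl⟩⟩

theorem pvInvA_step (ign : List String) (l : List (Int × Char))
    (A : PySem.Dict Char (Int × PySem.Dict Int Int)) (x : Int × Char)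
    (h : pvInvA ign l A) : pvInvA ign (l ++ [x]) (pvStepA ign A x) := by
  obtain ⟨hk, hnd, hc⟩ := h
  obtain ⟨p, c0⟩ := x
  by_cases hig : pvIgn ign c0 = true
  · have hig' : ign.contains (String.mk [c0]) = true := hig
    have hmemS : String.mk [c0] ∈ ign := by simpa using hig'
    have hstep : pvStepA ign A (p, c0) = A := by simp [pvStepA, hmemS]
    rw [hstep]
    refine ⟨?_, hnd, ?_⟩
    · rw [hk]
      congr 1
      rw [List.filter_append]
      simp [hig]
    · intro c hcig
      have hne : ((c0 : Char) == c) = false := by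
        rw [beq_eq_false_iff_ne]
        intro hb
        rw [hb, hcig] at hig
        cases hig
      have hocc : pvOcc c (l ++ [(p, c0)]) = pvOcc c l := by
        rw [pvOcc_append]
        simp [hne]
      rw [hocc]
      exact hc c hcig
  · have hig' : pvIgn ign c0 = false := by simpa using hig
    have higc : ign.contains (String.mk [c0]) = false := hig'
    have hnmemS : String.mk [c0] ∉ ign := by simpa using higc
    have hfl : (l ++ [(p, c0)]).filter (fun pc => !pvIgn ign pc.2)
        = l.filter (fun pc => !pvIgn ign pc.2) ++ [(p, c0)] := by
      rw [List.filter_append]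
      simp [pvIgn, hnmemS]
    cases hA : A.get? c0 with
    | none =>
      have hocc0 : pvOcc c0 l = [] := by
        rcases hc c0 hig' with ⟨_, h0⟩ | ⟨s, hs, _⟩
        · exact h0
        · rw [hA] at hs; cases hs
      have hcont : A.contains c0 = false := by
        rw [PySem.Dict.contains_eq_isSome_get?, hA]; rfl
      have hnotmem : c0 ∉ A.keys := by
        rw [PySem.Dict.contains_eq_decide_mem_keys] at hcont
        simpa using hcont
      have hstep : pvStepA ign A (p, c0) = A.insert c0 (p, PySem.Dict.empty) := by
        simp [pvStepA, hnmemS, hA]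
      rw [hstep]
      refine ⟨?_, PySem.Dict.nodup_keys_insert _ _ _ hnd, ?_⟩
      · rw [PySem.Dict.keys_insert_of_not_contains _ _ hcont, hk, hfl, List.map_append]
        simp only [List.map_cons, List.map_nil]
        rw [pv_dedup_append]
        have : c0 ∉ PySem.List.dedup ((l.filter (fun pc => !pvIgn ign pc.2)).map Prod.snd) := by
          rw [← hk]; exact hnotmem
        rw [if_neg this]
      · intro c hcig
        by_cases hcc : c = c0
        · subst hcc
          right
          have hocc' : pvOcc c (l ++ [(p, c)]) = [p] := by
            rw [pvOcc_append, hocc0]; simp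
          refine ⟨PySem.Dict.empty, ?_, by simp [hocc'], ?_, ?_, PySem.Dict.nodup_keys_empty⟩
          · rw [PySem.Dict.get?_insert]
            simp [hocc']
          · intro k; simp [hocc', pvGaps, PySem.Dict.getD_empty]
          · intro k; simp [hocc', pvGaps, PySem.Dict.contains_empty]
        · have hne : ((c0 : Char) == c) = false := beq_eq_false_iff_ne.mpr (Ne.symm hcc)
          have hocc' : pvOcc c (l ++ [(p, c0)]) = pvOcc c l := by
            rw [pvOcc_append]; simp [hne]
          have hget : (A.insert c0 (p, PySem.Dict.empty)).get? c = A.get? c := by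
            rw [PySem.Dict.get?_insert]; simp [hcc]
          rw [hocc', hget]
          exact hc c hcig
    | some v =>
      obtain ⟨q, s⟩ := v
      rcases hc c0 hig' with ⟨hnone, _⟩ | ⟨s', hs', hocc0, hcnt, hcontn, hsnd⟩
      · rw [hA] at hnone; cases hnone
      · rw [hA] at hs'
        rw [Option.some_inj] at hs'
        injection hs' with hq hseq
        subst hseq
        have hcont : A.contains c0 = true := by
          rw [PySem.Dict.contains_eq_isSome_get?, hA]; rfl
        have hmem : c0 ∈ A.keys := by
          rw [PySem.Dict.contains_eq_decide_mem_keys] at hcont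
          simpa using hcont
        have hstep : pvStepA ign A (p, c0) = A.insert c0 (p, s.modify (p - q) 0 (· + 1)) := by
          simp [pvStepA, hnmemS, hA]
        rw [hstep]
        refine ⟨?_, ?_, ?_⟩
        · rw [PySem.Dict.keys_insert_of_contains _ _ hcont, hk, hfl, List.map_append]
          simp only [List.map_cons, List.map_nil]
          rw [pv_dedup_append]
          have : c0 ∈ PySem.List.dedup ((l.filter (fun pc => !pvIgn ign pc.2)).map Prod.snd) := by
            rw [← hk]; exact hmem
          rw [if_pos this]
        · rw [PySem.Dict.keys_insert_of_contains _ _ hcont]; exact hnd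
        · intro c hcig
          by_cases hcc : c = c0
          · subst hcc
            right
            have hocc' : pvOcc c (l ++ [(p, c)]) = pvOcc c l ++ [p] := by
              rw [pvOcc_append]; simp
            have hlast : ((pvOcc c l ++ [p]).getLast?).getD 0 = p := by
              simp [List.getLast?_concat]
            have hgaps : pvGaps (pvOcc c l ++ [p]) = pvGaps (pvOcc c l) ++ [p - q] := by
              rw [pvGaps_append _ _ hocc0, ← hq]
            refine ⟨s.modify (p - q) 0 (· + 1), ?_, by simp [hocc'], ?_, ?_, ?_⟩
            · rw [PySem.Dict.get?_insert]
              simp [hocc', hlast]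
            · intro k
              rw [hocc', hgaps, PySem.Dict.getD_modify, List.count_append]
              by_cases hkk : k = p - q
              · subst hkk
                simp [hcnt]
              · rw [if_neg hkk, hcnt k]
                have h0 : List.count k [p - q] = 0 :=
                  List.count_eq_zero.mpr (by simp [hkk])
                rw [h0]
                simp
            · intro k
              rw [hocc', hgaps, PySem.Dict.contains_modify, hcontn k, Bool.eq_iff_iff]
              simp
              tauto
            · rw [PySem.Dict.keys_modify]
              exact PySem.Dict.nodup_keys_insert _ _ _ hsnd
          · have hne : ((c0 : Char) == c) = false := beq_eq_false_iff_ne.mpr (Ne.symm hcc)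
            have hocc' : pvOcc c (l ++ [(p, c0)]) = pvOcc c l := by
              rw [pvOcc_append]; simp [hne]
            have hget : (A.insert c0 (p, s.modify (p - q) 0 (· + 1))).get? c = A.get? c := by
              rw [PySem.Dict.get?_insert]; simp [hcc]
            rw [hocc', hget]
            exact hc c hcig

theorem pvInvA_fold (ign : List String) (l : List (Int × Char)) :
    pvInvA ign l (l.foldl (pvStepA ign) PySem.Dict.empty) := by
  induction l using List.reverseRecOn with
  | nil => exact pvInvA_nil ign
  | append_singleton l x ih =>
    rw [List.foldl_append]
    exact pvInvA_step ign l _ x ih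

-- ===== merge-pass lemmas (A's second pass) =====
theorem pv_wfold_getD (ls : List (Int × Int)) (o : PySem.Dict Int Int) (k : Int) :
    (ls.foldl (fun o dv => o.modify dv.1 0 (· + dv.2)) o).getD k 0
      = o.getD k 0 + ((ls.filter (fun dv => dv.1 == k)).map (·.2)).sum := by
  induction ls generalizing o with
  | nil => simp
  | cons a t ih =>
    simp only [List.foldl_cons, ih, List.filter_cons]
    by_cases hk : a.1 = k
    · simp [hk]; ring
    · simp [hk, PySem.Dict.getD_modify, Ne.symm hk]

theorem pv_wfold_contains (ls : List (Int × Int)) (o : PySem.Dict Int Int) (k : Int) :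
    (ls.foldl (fun o dv => o.modify dv.1 0 (· + dv.2)) o).contains k
      = (o.contains k || ls.any (fun dv => dv.1 == k)) := by
  induction ls generalizing o with
  | nil => simp
  | cons a t ih =>
    simp only [List.foldl_cons, ih, PySem.Dict.contains_modify, List.any_cons]
    by_cases hk : k = a.1
    · rw [hk]; cases o.contains a.1 <;> simp
    · have e1 : (k == a.1) = false := beq_eq_false_iff_ne.mpr hk
      have e2 : (a.1 == k) = false := beq_eq_false_iff_ne.mpr (fun h => hk h.symm)
      rw [e1, e2]
      cases o.contains k <;> simp

theorem pv_wfold_nodup (ls : List (Int × Int)) (o : PySem.Dict Int Int) (h : o.keys.Nodup) :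
    (ls.foldl (fun o dv => o.modify dv.1 0 (· + dv.2)) o).keys.Nodup := by
  induction ls generalizing o with
  | nil => exact h
  | cons a t ih =>
    refine ih _ ?_
    rw [PySem.Dict.keys_modify]
    exact PySem.Dict.nodup_keys_insert _ _ _ h

theorem pv_filterSum_eq_getD (s : PySem.Dict Int Int) (h : s.keys.Nodup) (k : Int) :
    ((s.items.filter (fun dv => dv.1 == k)).map (·.2)).sum = s.getD k 0 := by
  obtain ⟨l⟩ := s
  induction l with
  | nil => rfl
  | cons a t ih =>
    simp only [PySem.Dict.keys, List.map_cons, List.nodup_cons] at h ih ⊢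
    rw [PySem.Dict.getD_eq_get?_getD]
    obtain ⟨a1, a2⟩ := a
    rw [PySem.Dict.get?_mk_cons]
    by_cases hk : a1 = k
    · have hnot : ∀ p ∈ t, ¬ ((p.1 == k) = true) := by
        intro p hp hpk
        exact h.1 (hk ▸ beq_iff_eq.mp hpk ▸ List.mem_map.mpr ⟨p, hp, rfl⟩)
      simp only [List.filter_cons]
      rw [List.filter_eq_nil_iff.mpr hnot]
      simp [hk]
    · simp only [List.filter_cons]
      have := ih h.2
      rw [PySem.Dict.getD_eq_get?_getD] at this
      simp [hk, this]

theorem pv_any_eq_contains (s : PySem.Dict Int Int) (k : Int) :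
    s.items.any (fun dv => dv.1 == k) = s.contains k := rfl

theorem pv_merge_getD (its : List (Char × (Int × PySem.Dict Int Int))) (o : PySem.Dict Int Int)
    (k : Int) (h : ∀ kv ∈ its, kv.2.2.keys.Nodup) :
    (its.foldl (fun o kv => kv.2.2.items.foldl (fun o dv => o.modify dv.1 0 (· + dv.2)) o) o).getD k 0
      = o.getD k 0 + (its.map (fun kv => kv.2.2.getD k 0)).sum := by
  induction its generalizing o with
  | nil => simp
  | cons a t ih =>
    simp only [List.foldl_cons, List.map_cons, List.sum_cons]
    rw [ih _ (fun kv hkv => h kv (List.mem_cons_of_mem a hkv)),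
        pv_wfold_getD, pv_filterSum_eq_getD _ (h a (List.mem_cons_self))]
    ring

theorem pv_merge_contains (its : List (Char × (Int × PySem.Dict Int Int)))
    (o : PySem.Dict Int Int) (k : Int) :
    (its.foldl (fun o kv => kv.2.2.items.foldl (fun o dv => o.modify dv.1 0 (· + dv.2)) o) o).contains k
      = (o.contains k || its.any (fun kv => kv.2.2.contains k)) := by
  induction its generalizing o with
  | nil => simp
  | cons a t ih =>
    simp only [List.foldl_cons, List.any_cons]
    rw [ih, pv_wfold_contains, pv_any_eq_contains, Bool.or_assoc]

theorem pv_merge_nodup (its : List (Char × (Int × PySem.Dict Int Int))) (o : PySem.Dict Int Int)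
    (h : o.keys.Nodup) :
    (its.foldl (fun o kv => kv.2.2.items.foldl (fun o dv => o.modify dv.1 0 (· + dv.2)) o) o).keys.Nodup := by
  induction its generalizing o with
  | nil => exact h
  | cons a t ih => exact ih _ (pv_wfold_nodup _ _ h)

-- ===== B-side glue =====
theorem pv_map_snd_filter (ign : List String) (l : List (Int × Char)) :
    (l.filter (fun pc => !pvIgn ign pc.2)).map Prod.snd
      = (l.map Prod.snd).filter (fun c => !pvIgn ign c) := by
  induction l with
  | nil => rfl
  | cons a t ih =>
    by_cases h : pvIgn ign a.2 <;> simp [List.filter_cons, h, ih]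

theorem pv_sum_ite_filter (p : Char → Bool) (f : Char → Int) : ∀ (C : List Char),
    (C.map (fun c => if p c then f c else 0)).sum = ((C.filter p).map f).sum
  | [] => rfl
  | c :: C => by
    by_cases h : p c <;> simp [List.filter_cons, h, pv_sum_ite_filter p f C]

theorem pvOcc_pos (P : List (Int × Char)) (hpos : ∀ pc ∈ P, 0 ≤ pc.1) (ch : Char) :
    ∀ x ∈ pvOcc ch P, 0 ≤ x := by
  intro x hx
  obtain ⟨pc, hpc, rfl⟩ := List.mem_map.mp hx
  exact hpos pc (List.mem_of_mem_filter hpc)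

-- the outer fold of B, as a flatMap of per-character gap lists
theorem pv_fold_gaps (ign : List String) (P : List (Int × Char))
    (hpos : ∀ pc ∈ P, 0 ≤ pc.1) : ∀ (C : List Char) (g : List Int),
    C.foldl (fun g ch => if ign.contains (String.mk [ch]) then g
        else (P.foldl (pvScanB ch) (g, -1)).1) g
      = g ++ C.flatMap (fun ch => if pvIgn ign ch then [] else pvGaps (pvOcc ch P))
  | [], g => by simp
  | ch :: C, g => by
    by_cases hig : pvIgn ign ch = true
    · have hig' : ign.contains (String.mk [ch]) = true := hig
      simp only [List.foldl_cons, hig', if_true, List.flatMap_cons, hig]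
      rw [pv_fold_gaps ign P hpos C g]
      simp
    · have hig' : ign.contains (String.mk [ch]) = false := by simpa [pvIgn] using hig
      simp only [List.foldl_cons, hig', Bool.false_eq_true, if_false, List.flatMap_cons]
      rw [pvScanB_fold]
      rw [pv_fold_gaps ign P hpos C _]
      rw [pvGapsFrom_neg _ (pvOcc_pos P hpos ch)]
      have hnmemS : String.mk [ch] ∉ ign := by simpa using hig'
      simp [pvIgn, hnmemS, List.append_assoc]

-- max over two Int lists with the same elements is the same
theorem pv_max_mem (l l' : List Int) (h : ∀ x, x ∈ l ↔ x ∈ l') :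
    (PySem.List.max? l (fun x => x)).getD 0 = (PySem.List.max? l' (fun x => x)).getD 0 := by
  cases hl : PySem.List.max? l (fun x => x) with
  | none =>
    have hl0 : l = [] := (PySem.List.max?_eq_none_iff l _).mp hl
    have hl'0 : l' = [] := by
      cases hl' : l' with
      | nil => rfl
      | cons a t => exact absurd ((h a).mpr (by simp [hl'])) (by simp [hl0])
    rw [hl'0, (PySem.List.max?_eq_none_iff ([] : List Int) (fun x => x)).mpr rfl]
  | some m =>
    have hm' : m ∈ l' := (h m).mp (PySem.List.max?_mem hl)
    cases hl' : PySem.List.max? l' (fun x => x) with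
    | none =>
      rw [(PySem.List.max?_eq_none_iff l' _).mp hl'] at hm'
      cases hm'
    | some m' =>
      have h1 := PySem.List.max?_isMax hl m' ((h m').mpr (PySem.List.max?_mem hl'))
      have h2 := PySem.List.max?_isMax hl' m hm'
      simp only [Option.getD_some]
      exact le_antisymm h2 h1

-- the whole equivalence, on the toList of the text
theorem pv_result (ign : List String) (tl : List Char) :
    (PySem.List.max? (pvMergeA ((PySem.List.enumerate tl 0).foldl (pvStepA ign)
        PySem.Dict.empty)).values (fun x => x)).getD 0
    = (PySem.List.max? (((PySem.List.dedup tl).foldl (fun g ch =>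
          if ign.contains (String.mk [ch]) then g
          else ((PySem.List.enumerate tl 0).foldl (pvScanB ch) (g, -1)).1) []).map
        (fun d => (PySem.List.count ((PySem.List.dedup tl).foldl (fun g ch =>
          if ign.contains (String.mk [ch]) then g
          else ((PySem.List.enumerate tl 0).foldl (pvScanB ch) (g, -1)).1) []) d : Int)))
        (fun x => x)).getD 0 := by
  set P := PySem.List.enumerate tl 0 with hP
  set Af := P.foldl (pvStepA ign) PySem.Dict.empty with hAf
  obtain ⟨hk, hnd, hc⟩ := pvInvA_fold ign P
  have hpos : ∀ pc ∈ P, 0 ≤ pc.1 := by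
    intro pc hpc
    rw [hP] at hpc
    obtain ⟨k, hk2, hpc2⟩ := (PySem.List.mem_enumerate_iff tl 0 pc).mp hpc
    rw [hpc2]
    simp
  -- keys of Af
  have hsnd : P.map Prod.snd = tl := by
    rw [hP]
    simpa using PySem.List.map_snd_enumerate tl 0
  have hkeys : Af.keys = PySem.List.dedup (tl.filter (fun c => !pvIgn ign c)) := by
    rw [hk, pv_map_snd_filter, hsnd]
  have hmemkeys : ∀ c, c ∈ Af.keys ↔ (pvIgn ign c = false ∧ c ∈ tl) := by
    intro c
    rw [hkeys, PySem.List.mem_dedup, List.mem_filter]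
    simp [Bool.not_eq_true', and_comm]
  -- value at each key
  have hval : ∀ c ∈ Af.keys, ∃ s, Af.getD c (0, PySem.Dict.empty) = ((pvOcc c P).getLast?.getD 0, s) ∧
      (∀ k, s.getD k 0 = ((pvGaps (pvOcc c P)).count k : Int)) ∧
      (∀ k, s.contains k = (pvGaps (pvOcc c P)).contains k) ∧ s.keys.Nodup := by
    intro c hcmem
    have hig := ((hmemkeys c).mp hcmem).1
    rcases hc c hig with ⟨hnone, _⟩ | ⟨s, hgets, _, h1, h2, h3⟩
    · exfalso
      have := (PySem.Dict.get?_eq_none_iff_not_mem_keys Af c).mp hnone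
      exact this hcmem
    · exact ⟨s, by rw [PySem.Dict.getD_eq_get?_getD, hgets]; rfl, h1, h2, h3⟩
  have hitems : Af.items = Af.keys.map (fun c => (c, Af.getD c (0, PySem.Dict.empty))) :=
    PySem.Dict.items_eq_map_keys Af hnd _
  have hndit : ∀ kv ∈ Af.items, kv.2.2.keys.Nodup := by
    rw [hitems]
    rintro kv hkv
    obtain ⟨c, hcm, rfl⟩ := List.mem_map.mp hkv
    obtain ⟨s, hEq, _, _, h3⟩ := hval c hcm
    simpa [hEq] using h3
  set M := pvMergeA Af with hM
  have hMnd : M.keys.Nodup := pv_merge_nodup _ _ PySem.Dict.nodup_keys_empty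
  have hMgetD : ∀ k, M.getD k 0 = (Af.keys.map (fun c => ((pvGaps (pvOcc c P)).count k : Int))).sum := by
    intro k
    rw [hM]
    unfold pvMergeA
    rw [pv_merge_getD _ _ _ hndit, PySem.Dict.getD_empty, zero_add, hitems, List.map_map]
    apply congrArg List.sum
    apply List.map_congr_left
    intro c hcm
    obtain ⟨s, hEq, h1, _, _⟩ := hval c hcm
    simp [Function.comp, hEq, h1 k]
  have hMcont : ∀ k, (M.contains k = true) ↔ ∃ c ∈ Af.keys, k ∈ pvGaps (pvOcc c P) := by
    intro k
    rw [hM]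
    unfold pvMergeA
    rw [pv_merge_contains, PySem.Dict.contains_empty, Bool.false_or, hitems, List.any_eq_true]
    constructor
    · rintro ⟨kv, hkv, hcon⟩
      obtain ⟨c, hcm, rfl⟩ := List.mem_map.mp hkv
      obtain ⟨s, hEq, _, h2, _⟩ := hval c hcm
      refine ⟨c, hcm, ?_⟩
      rw [hEq] at hcon
      simp only at hcon
      rw [h2 k] at hcon
      exact List.contains_iff_mem.mp hcon
    · rintro ⟨c, hcm, hmem⟩
      obtain ⟨s, hEq, _, h2, _⟩ := hval c hcm
      refine ⟨(c, Af.getD c (0, PySem.Dict.empty)), List.mem_map.mpr ⟨c, hcm, rfl⟩, ?_⟩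
      rw [hEq]
      simp only
      rw [h2 k]
      exact List.contains_iff_mem.mpr hmem
  -- B's gap list
  set G := (PySem.List.dedup tl).flatMap
      (fun ch => if pvIgn ign ch then [] else pvGaps (pvOcc ch P)) with hG
  have hBfold : (PySem.List.dedup tl).foldl (fun g ch =>
      if ign.contains (String.mk [ch]) then g
      else (P.foldl (pvScanB ch) (g, -1)).1) [] = G := by
    rw [pv_fold_gaps ign P hpos (PySem.List.dedup tl) []]
    simp [hG]
  -- the two key lists are permutations of each other
  have hCperm : ((PySem.List.dedup tl).filter (fun c => !pvIgn ign c)).Perm Af.keys := by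
    rw [List.perm_ext_iff_of_nodup ((PySem.List.nodup_dedup tl).filter _) hnd]
    intro c
    rw [List.mem_filter, PySem.List.mem_dedup, hmemkeys c]
    simp [Bool.not_eq_true', and_comm]
  -- counts agree
  have hGcount : ∀ k, (G.count k : Int) = M.getD k 0 := by
    intro k
    rw [hG, List.count_flatMap, hMgetD, Nat.cast_list_sum, List.map_map]
    rw [← (hCperm.map (fun c => ((pvGaps (pvOcc c P)).count k : Int))).sum_eq]
    rw [← pv_sum_ite_filter (fun c => !pvIgn ign c) (fun c => ((pvGaps (pvOcc c P)).count k : Int))]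
    apply congrArg List.sum
    apply List.map_congr_left
    intro ch _
    by_cases h : pvIgn ign ch = true <;> simp [Function.comp, h]
  -- membership agrees
  have hGmem : ∀ k, k ∈ G ↔ (M.contains k = true) := by
    intro k
    rw [hG, List.mem_flatMap, hMcont k]
    constructor
    · rintro ⟨ch, hch, hmem⟩
      by_cases h : pvIgn ign ch = true
      · rw [if_pos h] at hmem; cases hmem
      · rw [if_neg h] at hmem
        exact ⟨ch, (hmemkeys ch).mpr ⟨by simpa using h, by rwa [PySem.List.mem_dedup] at hch⟩, hmem⟩
    · rintro ⟨c, hcm, hmem⟩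
      obtain ⟨hig, htl⟩ := (hmemkeys c).mp hcm
      exact ⟨c, by rw [PySem.List.mem_dedup]; exact htl, by rw [if_neg (by simp [hig])]; exact hmem⟩
  -- finish
  rw [hBfold]
  apply pv_max_mem
  intro x
  rw [PySem.Dict.values_eq_map_keys M hMnd 0, List.mem_map, List.mem_map]
  constructor
  · rintro ⟨j, hj, rfl⟩
    have hjG : j ∈ G := (hGmem j).mpr (by
      rw [PySem.Dict.contains_eq_decide_mem_keys]
      simpa using hj)
    exact ⟨j, hjG, by rw [PySem.List.count_eq]; exact hGcount j⟩
  · rintro ⟨d, hd, rfl⟩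
    have hdk : d ∈ M.keys := by
      have := (hGmem d).mp hd
      rw [PySem.Dict.contains_eq_decide_mem_keys] at this
      simpa using this
    exact ⟨d, hdk, by rw [PySem.List.count_eq]; exact (hGcount d).symm⟩

-- ===== VERDICT (by name: the statement is the Claim_ definition above) =====
theorem find_redundancy_length_spec : Claim_equal_find_redundancy_length := by
  intro text ign _
  unfold Spec_find_redundancy_length find_redundancy_length find_redundancy_length_alt
  exact pv_result ign text.toList
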